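-- pv_equiv track=rewrite | github.com/Hegemony/Leetcode-Practice | LeetCode practice/First/53-1.search.py | findRightPosition
-- ===== SOURCE A (Python) =====
-- def findRightPosition(nums, l, target):
--     i, j = 0, l
--     while i < j:
--         mid = (i + j) // 2
--         if nums[mid] < target:
--             i = mid + 1
--         elif nums[mid] == target:
--             i = mid + 1
--         else:
--             j = mid
--     return i
-- ===== SOURCE B (Python) =====
-- def findRightPosition(nums, l, target):
--     # Recursion on a list segment: f(seg) returns the rightmost insertion
--     # position of target within seg; the two-pointer index pair disappears.
--     def f(seg):
--         if not seg:
--             return 0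
--         m = len(seg) // 2
--         if seg[m] <= target:
--             return m + 1 + f(seg[m+1:])
--         return f(seg[:m])
--     if l <= 0:
--         return 0
--     return f(nums[:l])
-- ===== Notes on version B (the rewrite author's own statement) =====
-- stated objective: alternative
-- what changed: A's iterative two-pointer loop over indices (i, j) is replaced by structural recursion on list segments: a helper f(seg) returns the insertion position within the slice itself and the caller adds the offset, so no index pair is maintained at all.
-- outside the precondition, e.g. on findRightPosition([-3, -1, 3, 0, 106, 10], 8, 1): A returns 2, B returns 4; on findRightPosition([1, 2], 3, 0): A returns 0, B returns 0
import Mathlib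
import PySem

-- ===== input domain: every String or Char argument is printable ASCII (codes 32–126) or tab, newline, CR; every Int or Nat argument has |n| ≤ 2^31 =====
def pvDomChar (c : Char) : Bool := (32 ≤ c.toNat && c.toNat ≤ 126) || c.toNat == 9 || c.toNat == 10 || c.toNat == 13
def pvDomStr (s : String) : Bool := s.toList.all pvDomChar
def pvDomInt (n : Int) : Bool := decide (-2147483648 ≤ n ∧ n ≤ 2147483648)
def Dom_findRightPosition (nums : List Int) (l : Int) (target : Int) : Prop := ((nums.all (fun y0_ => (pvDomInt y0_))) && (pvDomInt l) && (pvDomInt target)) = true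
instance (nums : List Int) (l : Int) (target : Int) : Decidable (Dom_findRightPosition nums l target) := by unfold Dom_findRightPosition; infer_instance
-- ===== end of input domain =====

-- B replaces A's iterative two-pointer index loop by structural recursion on list
-- segments (a helper returning the position within the slice, the caller adding the offset).

-- ===== PORT A =====
-- while i < j: mid = (i+j)//2; branch on nums[mid] < / == / > target
def findRightPositionLoop (nums : List Int) (target : Int) (i j : Int) : Int :=
  if h : i < j then
    let mid := PySem.Int.floordiv (i + j) 2
    if (PySem.List.pyGet? nums mid).getD 0 < target then
      findRightPositionLoop nums target (mid + 1) j
    else if (PySem.List.pyGet? nums mid).getD 0 = target then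
      findRightPositionLoop nums target (mid + 1) j
    else
      findRightPositionLoop nums target i mid
  else i
termination_by (j - i).toNat
decreasing_by
  all_goals
    have hb := PySem.Int.floordiv_two_mid_bounds (le_of_lt h)
    have hlt : PySem.Int.floordiv (i + j) 2 < j := by
      have := PySem.Int.floordiv_lt_iff_lt_mul (a := i + j) (b := 2) (q := j) (by omega)
      omega
    omega

def findRightPosition (nums : List Int) (l : Int) (target : Int) : Int :=
  findRightPositionLoop nums target 0 l

-- ===== PORT B =====
-- def f(seg): if not seg: 0; m = len(seg)//2; m+1+f(seg[m+1:]) if seg[m] <= target else f(seg[:m])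
-- seg[m] with 0 ≤ m < len(seg) is exactly List.getD; seg[m+1:] / seg[:m] with
-- nonnegative bounds are exactly List.drop / List.take; len(seg)//2 on a Nat is Nat division.
def findRightSeg (target : Int) (seg : List Int) : Int :=
  if hs : seg = [] then 0
  else
    let m := seg.length / 2
    if seg.getD m 0 ≤ target then (m : Int) + 1 + findRightSeg target (seg.drop (m + 1))
    else findRightSeg target (seg.take m)
termination_by seg.length
decreasing_by
  · have : seg.length ≠ 0 := fun h => hs (List.length_eq_zero_iff.mp h)
    simp [List.length_drop]; omega
  · have : seg.length ≠ 0 := fun h => hs (List.length_eq_zero_iff.mp h)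
    have := Nat.div_lt_self (Nat.pos_of_ne_zero this) (by omega : 1 < 2)
    simp [List.length_take]; omega

-- if l <= 0: return 0; return f(nums[:l])   (nums[:l] with l > 0 is List.take l.toNat)
def findRightPosition_alt (nums : List Int) (l : Int) (target : Int) : Int :=
  if l ≤ 0 then 0 else findRightSeg target (nums.take l.toNat)

-- ===== PRECONDITION & SPEC =====
-- Pre_ excludes l > len(nums): there the Python A's loop may read an out-of-range
-- index and raise IndexError (on a few such inputs the range narrows before an
-- out-of-range read and A still returns; B searches nums[:l] = nums there instead).
def Pre_findRightPosition (nums : List Int) (l : Int) (target : Int) : Prop :=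
  l ≤ (nums.length : Int)
instance (nums : List Int) (l : Int) (target : Int) : Decidable (Pre_findRightPosition nums l target) := by unfold Pre_findRightPosition; infer_instance

def pvWitness_findRightPosition : List Int × Int × Int := ([1, 3, 3, 5], 4, 3)

def Spec_findRightPosition (nums : List Int) (l : Int) (target : Int) (out : Int) : Prop := out = findRightPosition_alt nums l target
instance (nums : List Int) (l : Int) (target : Int) (out : Int) : Decidable (Spec_findRightPosition nums l target out) := by unfold Spec_findRightPosition; infer_instance

-- ===== CLAIM (what is proved, stated in full; the proofs are below) =====
def Claim_equal_findRightPosition : Prop := ∀ (nums : List Int) (l : Int) (target : Int), Dom_findRightPosition nums l target → Pre_findRightPosition nums l target → Spec_findRightPosition nums l target (findRightPosition nums l target)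

-- ===== LEMMAS AND PROOFS =====
-- Invariant: A's loop on [i, j) computes i plus B's answer on the segment nums[i:j].
lemma loop_eq_seg (nums : List Int) (target : Int) :
    ∀ (n : Nat) (i j : Int), 0 ≤ i → (j - i).toNat = n → j ≤ (nums.length : Int) →
      findRightPositionLoop nums target i j =
        i + findRightSeg target ((nums.drop i.toNat).take n) := by
  intro n
  induction n using Nat.strong_induction_on with
  | _ n ih =>
    intro i j hi hn hj
    rw [findRightPositionLoop]
    by_cases h : i < j
    · have hn0 : 0 < n := by omega
      have hj' : j = i + n := by omega
      -- mid = i + n / 2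
      have hmid : PySem.Int.floordiv (i + j) 2 = i + ((n / 2 : Nat) : Int) := by
        rw [PySem.Int.floordiv_eq_iff_of_pos (by omega)]
        omega
      set m : Nat := n / 2 with hm
      have hmn : m < n := Nat.div_lt_self hn0 (by omega)
      have hseg_len : ((nums.drop i.toNat).take n).length = n := by
        simp [List.length_take, List.length_drop]; omega
      have hseg_ne : (nums.drop i.toNat).take n ≠ [] := by
        intro he; rw [he] at hseg_len; simp at hseg_len; omega
      -- the midpoint element, from A's side and from the segment
      have hval : (PySem.List.pyGet? nums (PySem.Int.floordiv (i + j) 2)).getD 0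
          = ((nums.drop i.toNat).take n).getD m 0 := by
        rw [hmid]
        have h1 : i + ((m : Nat) : Int) = ((i.toNat + m : Nat) : Int) := by omega
        rw [h1, PySem.List.pyGet?_natCast]
        have hlt : i.toNat + m < nums.length := by omega
        rw [List.getD_eq_getElem?_getD, List.getElem?_take_of_lt (by omega),
          List.getElem?_drop, List.getElem?_eq_getElem hlt]
      rw [dif_pos h]
      -- unfold B's step on the segment
      rw [findRightSeg, dif_neg hseg_ne]
      simp only [hseg_len]
      by_cases hle : ((nums.drop i.toNat).take n).getD m 0 ≤ target
      · have hidx : (PySem.Int.floordiv (i + j) 2 + 1).toNat = i.toNat + (m + 1) := by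
          rw [hmid]; omega
        have hrec := ih (n - (m + 1)) (by omega) (PySem.Int.floordiv (i + j) 2 + 1) j
          (by omega) (by rw [hmid]; omega) hj
        rw [hidx] at hrec
        have hdrop : ((nums.drop i.toNat).take n).drop (m + 1)
            = (nums.drop (i.toNat + (m + 1))).take (n - (m + 1)) := by
          rw [List.drop_take, List.drop_drop]
        by_cases hlt : ((nums.drop i.toNat).take n).getD m 0 < target
        · rw [if_pos (by rw [hval]; exact hlt), hrec, if_pos hle, hdrop, hmid]; ring
        · have heq : ((nums.drop i.toNat).take n).getD m 0 = target := by omega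
          rw [if_neg (by rw [hval]; omega), if_pos (by rw [hval]; exact heq),
            hrec, if_pos hle, hdrop, hmid]; ring
      · have hgt : target < ((nums.drop i.toNat).take n).getD m 0 := by omega
        rw [if_neg (by rw [hval]; omega), if_neg (by rw [hval]; omega), if_neg hle]
        have := ih m (by omega) i (PySem.Int.floordiv (i + j) 2) hi (by rw [hmid]; omega)
          (by omega)
        rw [this]
        congr 2
        rw [List.take_take]; congr 1; omega
    · rw [dif_neg h]
      have : n = 0 := by omega
      subst this
      rw [findRightSeg]
      simp
-- ===== VERDICT (by name: the statement is the Claim_ definition above) =====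
theorem findRightPosition_spec : Claim_equal_findRightPosition := by
  intro nums l target _ hpre
  unfold Spec_findRightPosition findRightPosition findRightPosition_alt
  by_cases hl : l ≤ 0
  · rw [findRightPositionLoop, dif_neg (by omega), if_pos hl]
  · rw [if_neg hl, loop_eq_seg nums target l.toNat 0 l le_rfl (by omega) hpre]
    simp
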